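-- pv_equiv track=rewrite | github.com/pypi-data/pypi-mirror-98 | packages/topoly/topoly-0.9.11-cp35-cp35m-manylinux2010_x86_64.whl/topoly/manipulation.py | prepareArcsFromBreaks
-- ===== SOURCE A (Python) =====
-- def prepareArcsFromBreaks(coordinates, breaks, bridges):
--     # preparing the arcs including the information in breaks and bridges
--     if not breaks:
--         breaks = []
--     if not bridges:
--         bridges = []
--     beg = min(list(coordinates.keys()))
--     end = max(list(coordinates.keys()))
--     bridging_atoms = [atom for bridge in bridges for atom in bridge]
--     arcs = []
--     arc = []
--     for k in range(beg, end + 1):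
--         if k == beg or k == end or k not in breaks + bridging_atoms:
--             arc.append(k)
--         elif k != beg and k != end and k in bridging_atoms:
--             arc.append(k)
--             arcs.append(arc)
--             arc = [k]
--         else:
--             arc.append(k)
--             arcs.append(arc)
--             arc = []
--     arcs.append(arc)
--     arcs += [list(bridge) for bridge in bridges]
--     return arcs
-- ===== SOURCE B (Python) =====
-- def prepareArcsFromBreaks(coordinates, breaks, bridges):
--     # split the key range at the sorted split points instead of scanning every position
--     breaks = breaks or []
--     bridges = bridges or []
--     keys = coordinates.keys()
--     beg, end = min(keys), max(keys)
--     bridgeset = {atom for bridge in bridges for atom in bridge}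
--     points = sorted(k for k in (set(breaks) | bridgeset) if beg < k < end)
--     arcs = []
--     start = beg
--     for k in points:
--         arcs.append(list(range(start, k + 1)))
--         start = k if k in bridgeset else k + 1
--     arcs.append(list(range(start, end + 1)))
--     arcs += [list(bridge) for bridge in bridges]
--     return arcs
-- ===== Notes on version B (the rewrite author's own statement) =====
-- stated objective: faster
-- what changed: Instead of scanning every integer position in [beg,end] and testing membership in the freshly concatenated list breaks+bridging_atoms at each step, B builds the break/bridge sets once, sorts only the split points strictly inside (beg,end), and emits each arc directly as a range between consecutive split points (a bridging point starts the next arc at itself, a break at the next position).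
import Mathlib
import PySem

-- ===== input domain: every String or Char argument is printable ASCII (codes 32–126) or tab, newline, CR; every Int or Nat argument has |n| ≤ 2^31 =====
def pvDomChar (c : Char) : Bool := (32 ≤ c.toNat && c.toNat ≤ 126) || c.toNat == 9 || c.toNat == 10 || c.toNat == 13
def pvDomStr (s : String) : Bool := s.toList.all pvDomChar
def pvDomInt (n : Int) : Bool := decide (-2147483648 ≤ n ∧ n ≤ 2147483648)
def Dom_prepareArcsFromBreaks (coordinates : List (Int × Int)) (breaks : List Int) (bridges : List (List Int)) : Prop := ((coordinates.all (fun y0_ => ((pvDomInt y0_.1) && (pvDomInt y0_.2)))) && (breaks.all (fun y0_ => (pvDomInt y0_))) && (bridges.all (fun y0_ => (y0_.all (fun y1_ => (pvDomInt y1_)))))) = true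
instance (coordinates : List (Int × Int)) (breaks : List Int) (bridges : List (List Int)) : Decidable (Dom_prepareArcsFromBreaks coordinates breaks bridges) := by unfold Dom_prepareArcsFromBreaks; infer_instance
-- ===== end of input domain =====

-- B replaces A's per-position scan of [beg,end] (with a fresh breaks+bridging concatenation and
-- linear membership test at every position) by sorting the split points once and emitting each arc
-- as a range between consecutive split points; Pre_ excludes an empty coordinates dict, where
-- Python's min(list(coordinates.keys())) raises ValueError.


-- ===== PORT A =====
-- the body of A's 'for k in range(beg, end + 1)' loop, state = (arcs, arc)
def pvStepA (breaks bridging : List Int) (beg fin : Int)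
    (st : List (List Int) × List Int) (k : Int) : List (List Int) × List Int :=
  if k = beg ∨ k = fin ∨ k ∉ breaks ++ bridging then
    (st.1, st.2 ++ [k])
  else if k ≠ beg ∧ k ≠ fin ∧ k ∈ bridging then
    (st.1 ++ [st.2 ++ [k]], [k])
  else
    (st.1 ++ [st.2 ++ [k]], [])

def prepareArcsFromBreaks (coordinates : List (Int × Int)) (breaks : List Int) (bridges : List (List Int)) : List (List Int) :=
  match PySem.List.min? (PySem.Dict.ofList coordinates).keys (fun x => x),
        PySem.List.max? (PySem.Dict.ofList coordinates).keys (fun x => x) with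
  | some beg, some fin =>
      let bridging := bridges.flatMap (fun bridge => bridge)
      let st := (PySem.List.pyRange beg (fin + 1) 1).foldl (pvStepA breaks bridging beg fin) ([], [])
      (st.1 ++ [st.2]) ++ bridges.map (fun bridge => bridge)
  | _, _ => []   -- min()/max() of an empty dict raise ValueError: excluded by Pre_

-- ===== PORT B =====
-- the body of B's 'for k in points' loop, state = (arcs, start)
def pvStepB (bridgeset : PySem.Set Int) (st : List (List Int) × Int) (k : Int) : List (List Int) × Int :=
  (st.1 ++ [PySem.List.pyRange st.2 (k + 1) 1],
   if PySem.Set.contains bridgeset k then k else k + 1)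

def prepareArcsFromBreaks_alt (coordinates : List (Int × Int)) (breaks : List Int) (bridges : List (List Int)) : List (List Int) :=
  match PySem.List.min? (PySem.Dict.ofList coordinates).keys (fun x => x) with
  | none => []   -- min() of an empty dict raises ValueError: excluded by Pre_
  | some beg =>
    match PySem.List.max? (PySem.Dict.ofList coordinates).keys (fun x => x) with
    | none => []
    | some fin =>
      let bridgeset : PySem.Set Int := PySem.Set.ofList (bridges.flatMap (fun bridge => bridge))
      let points := PySem.List.sorted
        ((PySem.Set.union (PySem.Set.ofList breaks) bridgeset).filter
          (fun k => decide (beg < k) && decide (k < fin))) (fun x => x) false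
      let st := points.foldl (pvStepB bridgeset) ([], beg)
      (st.1 ++ [PySem.List.pyRange st.2 (fin + 1) 1]) ++ bridges.map (fun bridge => bridge)

-- ===== PRECONDITION & SPEC =====
-- Pre_ excludes only the empty coordinates dict: there Python's min(list(coordinates.keys())) raises ValueError.
def Pre_prepareArcsFromBreaks (coordinates : List (Int × Int)) (breaks : List Int) (bridges : List (List Int)) : Prop :=
  coordinates ≠ []
instance (coordinates : List (Int × Int)) (breaks : List Int) (bridges : List (List Int)) : Decidable (Pre_prepareArcsFromBreaks coordinates breaks bridges) := by unfold Pre_prepareArcsFromBreaks; infer_instance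
def pvWitness_prepareArcsFromBreaks : (List (Int × Int)) × List Int × List (List Int) := ([(1, 0), (4, 2)], [2], [[3]])

def Spec_prepareArcsFromBreaks (coordinates : List (Int × Int)) (breaks : List Int) (bridges : List (List Int)) (out : List (List Int)) : Prop := out = prepareArcsFromBreaks_alt coordinates breaks bridges
instance (coordinates : List (Int × Int)) (breaks : List Int) (bridges : List (List Int)) (out : List (List Int)) : Decidable (Spec_prepareArcsFromBreaks coordinates breaks bridges out) := by unfold Spec_prepareArcsFromBreaks; infer_instance

-- ===== CLAIM (what is proved, stated in full; the proofs are below) =====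
def Claim_equal_prepareArcsFromBreaks : Prop := ∀ (coordinates : List (Int × Int)) (breaks : List Int) (bridges : List (List Int)), Dom_prepareArcsFromBreaks coordinates breaks bridges → Pre_prepareArcsFromBreaks coordinates breaks bridges → Spec_prepareArcsFromBreaks coordinates breaks bridges (prepareArcsFromBreaks coordinates breaks bridges)

-- ===== LEMMAS AND PROOFS =====

-- the arcs A's loop still produces from position s on, entering with partial arc `arc`
def sufA (breaks bridging : List Int) (beg fin : Int) (s : Int) (arc : List Int) : List (List Int) :=
  ((PySem.List.pyRange s (fin + 1) 1).foldl (pvStepA breaks bridging beg fin) ([], arc)).1 ++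
  [((PySem.List.pyRange s (fin + 1) 1).foldl (pvStepA breaks bridging beg fin) ([], arc)).2]

-- the arcs B's loop still produces from the remaining split points `pts`, with current `start`
def sufB (bset : PySem.Set Int) (fin : Int) (pts : List Int) (start : Int) : List (List Int) :=
  (pts.foldl (pvStepB bset) ([], start)).1 ++
  [PySem.List.pyRange (pts.foldl (pvStepB bset) ([], start)).2 (fin + 1) 1]

-- a fold whose step only appends to the first component factors through the empty accumulator
lemma pvFoldlAcc {σ : Type} (f : List (List Int) × σ → Int → List (List Int) × σ)
    (hf : ∀ as arc k, f (as, arc) k = (as ++ (f ([], arc) k).1, (f ([], arc) k).2)) :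
    ∀ (l : List Int) (as : List (List Int)) (arc : σ),
      l.foldl f (as, arc) = (as ++ (l.foldl f ([], arc)).1, (l.foldl f ([], arc)).2) := by
  intro l
  induction l with
  | nil => intro as arc; simp
  | cons k l ih =>
    intro as arc
    simp only [List.foldl_cons]
    rw [hf as arc k, ih, hf [] arc k]
    simp only [List.nil_append]
    rw [ih (f ([], arc) k).1 (f ([], arc) k).2]
    simp [List.append_assoc]

lemma pvStepA_acc (breaks bridging : List Int) (beg fin : Int) :
    ∀ as arc k, pvStepA breaks bridging beg fin (as, arc) k =
      (as ++ (pvStepA breaks bridging beg fin ([], arc) k).1,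
       (pvStepA breaks bridging beg fin ([], arc) k).2) := by
  intro as arc k
  unfold pvStepA
  split
  · simp
  · split <;> simp

lemma pvStepB_acc (bset : PySem.Set Int) :
    ∀ as st k, pvStepB bset (as, st) k =
      (as ++ (pvStepB bset ([], st) k).1, (pvStepB bset ([], st) k).2) := by
  intro as st k
  simp [pvStepB]

lemma sufB_cons (bset : PySem.Set Int) (fin k start : Int) (pts : List Int) :
    sufB bset fin (k :: pts) start =
      PySem.List.pyRange start (k + 1) 1 ::
        sufB bset fin pts (if PySem.Set.contains bset k then k else k + 1) := by
  unfold sufB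
  simp only [List.foldl_cons, pvStepB, List.nil_append]
  rw [pvFoldlAcc (pvStepB bset) (pvStepB_acc bset) pts]
  simp

lemma sufA_step1 (breaks bridging : List Int) (beg fin s : Int) (arc : List Int)
    (h : s ≤ fin) (hc : s = beg ∨ s = fin ∨ s ∉ breaks ++ bridging) :
    sufA breaks bridging beg fin s arc = sufA breaks bridging beg fin (s + 1) (arc ++ [s]) := by
  unfold sufA
  rw [PySem.List.pyRange_one_cons (show s < fin + 1 by omega)]
  simp only [List.foldl_cons]
  rw [show pvStepA breaks bridging beg fin ([], arc) s = ([], arc ++ [s]) by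
    unfold pvStepA; rw [if_pos hc]]

lemma sufA_step2 (breaks bridging : List Int) (beg fin s : Int) (arc : List Int)
    (h : s ≤ fin) (h1 : ¬ (s = beg ∨ s = fin ∨ s ∉ breaks ++ bridging))
    (h2 : s ≠ beg ∧ s ≠ fin ∧ s ∈ bridging) :
    sufA breaks bridging beg fin s arc =
      (arc ++ [s]) :: sufA breaks bridging beg fin (s + 1) [s] := by
  unfold sufA
  rw [PySem.List.pyRange_one_cons (show s < fin + 1 by omega)]
  simp only [List.foldl_cons]
  rw [show pvStepA breaks bridging beg fin ([], arc) s = ([arc ++ [s]], [s]) by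
    unfold pvStepA; rw [if_neg h1, if_pos h2]; rfl]
  rw [pvFoldlAcc _ (pvStepA_acc breaks bridging beg fin) _ [arc ++ [s]] [s]]
  simp

lemma sufA_step3 (breaks bridging : List Int) (beg fin s : Int) (arc : List Int)
    (h : s ≤ fin) (h1 : ¬ (s = beg ∨ s = fin ∨ s ∉ breaks ++ bridging))
    (h2 : ¬ (s ≠ beg ∧ s ≠ fin ∧ s ∈ bridging)) :
    sufA breaks bridging beg fin s arc =
      (arc ++ [s]) :: sufA breaks bridging beg fin (s + 1) [] := by
  unfold sufA
  rw [PySem.List.pyRange_one_cons (show s < fin + 1 by omega)]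
  simp only [List.foldl_cons]
  rw [show pvStepA breaks bridging beg fin ([], arc) s = ([arc ++ [s]], []) by
    unfold pvStepA; rw [if_neg h1, if_neg h2]; rfl]
  rw [pvFoldlAcc _ (pvStepA_acc breaks bridging beg fin) _ [arc ++ [s]] []]
  simp

-- splitting the ≥ s filter of a strictly increasing list at s
lemma pvFilterSplit (s : Int) :
    ∀ (P : List Int), P.Pairwise (· < ·) →
      P.filter (fun p => decide (s ≤ p)) =
        (if s ∈ P then [s] else []) ++ P.filter (fun p => decide (s + 1 ≤ p)) := by
  intro P
  induction P with
  | nil => simp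
  | cons a t ih =>
    intro hp
    rw [List.pairwise_cons] at hp
    obtain ⟨ha, ht⟩ := hp
    rcases lt_trichotomy a s with h | rfl | h
    · have hmem : (s ∈ a :: t) = (s ∈ t) := by
        simp [List.mem_cons, show ¬ s = a by omega]
      simp only [List.filter_cons, hmem, decide_eq_true_eq,
        if_neg (show ¬ s ≤ a by omega), if_neg (show ¬ s + 1 ≤ a by omega)]
      exact ih ht
    · have h1 : t.filter (fun p => decide (a ≤ p)) = t :=
        List.filter_eq_self.2 (fun p hp => by simpa using le_of_lt (ha p hp))
      have h2 : t.filter (fun p => decide (a + 1 ≤ p)) = t :=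
        List.filter_eq_self.2 (fun p hp => by simpa using ha p hp)
      simp only [List.filter_cons, decide_eq_true_eq,
        if_pos (le_refl a), if_neg (show ¬ a + 1 ≤ a by omega), h1, h2]
      simp
    · have hmem : s ∉ a :: t := by
        intro hm
        rcases List.mem_cons.1 hm with rfl | hm
        · omega
        · exact absurd (ha s hm) (by omega)
      have h1 : t.filter (fun p => decide (s ≤ p)) = t :=
        List.filter_eq_self.2 (fun p hp => by simpa using le_of_lt (lt_trans h (ha p hp)))
      have h2 : t.filter (fun p => decide (s + 1 ≤ p)) = t :=
        List.filter_eq_self.2 (fun p hp => by simpa using lt_trans h (ha p hp))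
      simp only [List.filter_cons, decide_eq_true_eq,
        if_pos (le_of_lt h), if_pos (show s + 1 ≤ a by omega), if_neg hmem, h1, h2,
        List.nil_append]

lemma pvMain (breaks bridging : List Int) (bset : PySem.Set Int) (beg fin : Int) (P : List Int)
    (hP : ∀ p, p ∈ P ↔ beg < p ∧ p < fin ∧ (p ∈ breaks ∨ p ∈ bridging))
    (hPlt : P.Pairwise (· < ·))
    (hbs : ∀ k, PySem.Set.contains bset k = true ↔ k ∈ bridging) :
    ∀ (n : Nat) (s start : Int), (fin + 1 - s).toNat = n → beg < s → s ≤ fin + 1 → start ≤ s →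
      sufA breaks bridging beg fin s (PySem.List.pyRange start s 1) =
        sufB bset fin (P.filter (fun p => decide (s ≤ p))) start := by
  intro n
  induction n with
  | zero =>
    intro s start hn hb hs hst
    have hse : s = fin + 1 := by omega
    subst hse
    have hf : P.filter (fun p => decide (fin + 1 ≤ p)) = [] :=
      List.filter_eq_nil_iff.2 (fun p hp => by
        have := (hP p).1 hp; simp only [decide_eq_true_eq]; omega)
    rw [hf]
    unfold sufA sufB
    rw [PySem.List.pyRange_one_eq_nil (le_refl (fin + 1))]
    simp
  | succ n ih =>
    intro s start hn hb hs hst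
    have hsf : s ≤ fin := by omega
    by_cases hc1 : s = beg ∨ s = fin ∨ s ∉ breaks ++ bridging
    · have hsP : s ∉ P := by
        intro hm
        have hm' := (hP s).1 hm
        rcases hc1 with h | h | h
        · omega
        · omega
        · exact h (List.mem_append.2 hm'.2.2)
      rw [sufA_step1 breaks bridging beg fin s _ hsf hc1,
          ← PySem.List.pyRange_one_succ_right (show start ≤ s by omega),
          ih (s + 1) start (by omega) (by omega) (by omega) (by omega),
          pvFilterSplit s P hPlt, if_neg hsP, List.nil_append]
    · push_neg at hc1
      obtain ⟨hcb, hcf, hcm⟩ := hc1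
      have hcm' := List.mem_append.1 hcm
      by_cases hbr : s ∈ bridging
      · have hsP : s ∈ P := (hP s).2 ⟨hb, lt_of_le_of_ne hsf hcf, Or.inr hbr⟩
        rw [sufA_step2 breaks bridging beg fin s _ hsf
              (by push_neg; exact ⟨hcb, hcf, hcm⟩) ⟨hcb, hcf, hbr⟩,
            ← PySem.List.pyRange_one_succ_right (show start ≤ s by omega),
            show ([s] : List Int) = PySem.List.pyRange s (s + 1) 1 from
              (PySem.List.pyRange_one_singleton s).symm,
            ih (s + 1) s (by omega) (by omega) (by omega) (by omega),
            pvFilterSplit s P hPlt, if_pos hsP, List.singleton_append, sufB_cons,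
            if_pos ((hbs s).2 hbr)]
      · have hbk : s ∈ breaks := by
          rcases hcm' with h | h
          · exact h
          · exact absurd h hbr
        have hsP : s ∈ P := (hP s).2 ⟨hb, lt_of_le_of_ne hsf hcf, Or.inl hbk⟩
        have hcf' : PySem.Set.contains bset s ≠ true := fun h => hbr ((hbs s).1 h)
        rw [sufA_step3 breaks bridging beg fin s _ hsf
              (by push_neg; exact ⟨hcb, hcf, hcm⟩)
              (fun h => hbr h.2.2),
            ← PySem.List.pyRange_one_succ_right (show start ≤ s by omega),
            show ([] : List Int) = PySem.List.pyRange (s + 1) (s + 1) 1 from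
              (PySem.List.pyRange_one_eq_nil (le_refl (s + 1))).symm,
            ih (s + 1) (s + 1) (by omega) (by omega) (by omega) (by omega),
            pvFilterSplit s P hPlt, if_pos hsP, List.singleton_append, sufB_cons,
            if_neg hcf']

-- ===== VERDICT (by name: the statement is the Claim_ definition above) =====
theorem prepareArcsFromBreaks_spec : Claim_equal_prepareArcsFromBreaks := by
  unfold Claim_equal_prepareArcsFromBreaks
  intro coordinates breaks bridges _ _
  unfold Spec_prepareArcsFromBreaks prepareArcsFromBreaks prepareArcsFromBreaks_alt
  cases hmin : PySem.List.min? (PySem.Dict.ofList coordinates).keys (fun x => x) with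
  | none =>
    cases hmax : PySem.List.max? (PySem.Dict.ofList coordinates).keys (fun x => x) with
    | none => rfl
    | some fin => rfl
  | some beg =>
    cases hmax : PySem.List.max? (PySem.Dict.ofList coordinates).keys (fun x => x) with
    | none => rfl
    | some fin =>
      simp only []
      have hle : beg ≤ fin := PySem.List.max?_isMax hmax beg (PySem.List.min?_mem hmin)
      set bridging := bridges.flatMap (fun bridge => bridge) with hbrg
      set bset : PySem.Set Int := PySem.Set.ofList bridging with hbset
      set P := PySem.List.sorted
        ((PySem.Set.union (PySem.Set.ofList breaks) bset).filter
          (fun k => decide (beg < k) && decide (k < fin))) (fun x => x) false with hPdef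
      have hbs : ∀ k, PySem.Set.contains bset k = true ↔ k ∈ bridging := by
        intro k
        rw [PySem.Set.contains_iff, hbset, PySem.Set.mem_ofList]
      have hP : ∀ p, p ∈ P ↔ beg < p ∧ p < fin ∧ (p ∈ breaks ∨ p ∈ bridging) := by
        intro p
        rw [hPdef, PySem.List.mem_sorted, List.mem_filter, PySem.Set.mem_union,
            PySem.Set.mem_ofList, hbset, PySem.Set.mem_ofList]
        simp only [Bool.and_eq_true, decide_eq_true_eq]
        tauto
      have hPnd : P.Nodup := by
        rw [hPdef]
        exact (PySem.List.sorted_perm _ _ _).nodup_iff.2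
          ((PySem.Set.nodup_union _ bset (PySem.Set.nodup_ofList breaks)).filter _)
      have hPle : P.Pairwise (· ≤ ·) := by
        have := PySem.List.sorted_pairwise
          ((PySem.Set.union (PySem.Set.ofList breaks) bset).filter
            (fun k => decide (beg < k) && decide (k < fin))) (fun x => x)
        rw [← hPdef] at this
        exact this
      have hPlt : P.Pairwise (· < ·) :=
        (hPle.and hPnd).imp (fun h => lt_of_le_of_ne h.1 h.2)
      have hmain := pvMain breaks bridging bset beg fin P hP hPlt hbs
        (fin + 1 - (beg + 1)).toNat (beg + 1) beg rfl (by omega) (by omega) (by omega)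
      have hfilt : P.filter (fun p => decide (beg + 1 ≤ p)) = P :=
        List.filter_eq_self.2 (fun p hp => by
          have := (hP p).1 hp; simp only [decide_eq_true_eq]; omega)
      rw [hfilt] at hmain
      rw [PySem.List.pyRange_one_cons (show beg < fin + 1 by omega)]
      simp only [List.foldl_cons]
      rw [show pvStepA breaks bridging beg fin ([], []) beg = ([], [beg]) by
        unfold pvStepA; rw [if_pos (Or.inl rfl)]; rfl]
      rw [show ([beg] : List Int) = PySem.List.pyRange beg (beg + 1) 1 from
        (PySem.List.pyRange_one_singleton beg).symm]
      unfold sufA sufB at hmain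
      rw [hmain]
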